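-- pv_equiv track=rewrite | github.com/DregHub/DregDVR | ui/pages/instances_page/subpages/logs_viewer.py | _categorize_log_types
-- ===== SOURCE A (Python) =====
-- from typing import Optional, Dict, Any, List
--
-- LOG_TYPE_CATEGORIES = {
--     'Download': [
--         'download_live',
--         'download_live_recovery',
--         'download_captions',
--         'download_comments',
--         'download_posted',
--         'download_posted_notices',
--         'channel_playlist'
--     ],
--     'Upload': [
--         'upload_live',
--         'upload_posted',
--         'upload_ia',
--         'upload_yt',
--         'upload_rumble',
--         'upload_bitchute',
--         'upload_odysee',
--         'upload_captions'
--     ],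
--     'Misc': [
--         'core'
--     ]
-- }
--
-- def _categorize_log_types(all_log_types: List[str]) -> Dict[str, List[str]]:
--     """
--     Categorize available log types into Download, Upload, and Misc categories.
--
--     Args:
--         all_log_types: List of all available log types from database
--
--     Returns:
--         Dictionary with categories as keys and lists of log types as values
--     """
--     categorized = {
--         'Download': [],
--         'Upload': [],
--         'Misc': []
--     }
--
--     for log_type in all_log_types:
--         if log_type in LOG_TYPE_CATEGORIES['Download']:
--             categorized['Download'].append(log_type)
--         elif log_type in LOG_TYPE_CATEGORIES['Upload']:
--             categorized['Upload'].append(log_type)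
--         else:
--             categorized['Misc'].append(log_type)
--
--     return categorized
-- ===== SOURCE B (Python) =====
-- from typing import Optional, Dict, Any, List
--
-- LOG_TYPE_CATEGORIES = {
--     'Download': [
--         'download_live',
--         'download_live_recovery',
--         'download_captions',
--         'download_comments',
--         'download_posted',
--         'download_posted_notices',
--         'channel_playlist'
--     ],
--     'Upload': [
--         'upload_live',
--         'upload_posted',
--         'upload_ia',
--         'upload_yt',
--         'upload_rumble',
--         'upload_bitchute',
--         'upload_odysee',
--         'upload_captions'
--     ],
--     'Misc': [
--         'core'
--     ]
-- }
--
-- def _categorize_log_types(all_log_types: List[str]) -> Dict[str, List[str]]: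
--     # Three staged filter passes (order-preserving comprehensions), no mutable
--     # accumulator dict: each bucket is computed independently as a whole.
--     dl = set(LOG_TYPE_CATEGORIES['Download'])
--     ul = set(LOG_TYPE_CATEGORIES['Upload'])
--     return {
--         'Download': [t for t in all_log_types if t in dl],
--         'Upload': [t for t in all_log_types if t in ul],
--         'Misc': [t for t in all_log_types if t not in dl and t not in ul],
--     }
-- ===== Notes on version B (the rewrite author's own statement) =====
-- stated objective: alternative
-- what changed: B replaces A's single pass that mutates a result dict through an if/elif chain with three independent staged filter passes: each bucket is built as a whole by an order-preserving comprehension over the input, with set membership; correct because the three predicates partition the inputs and filtering preserves order.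
import Mathlib
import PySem

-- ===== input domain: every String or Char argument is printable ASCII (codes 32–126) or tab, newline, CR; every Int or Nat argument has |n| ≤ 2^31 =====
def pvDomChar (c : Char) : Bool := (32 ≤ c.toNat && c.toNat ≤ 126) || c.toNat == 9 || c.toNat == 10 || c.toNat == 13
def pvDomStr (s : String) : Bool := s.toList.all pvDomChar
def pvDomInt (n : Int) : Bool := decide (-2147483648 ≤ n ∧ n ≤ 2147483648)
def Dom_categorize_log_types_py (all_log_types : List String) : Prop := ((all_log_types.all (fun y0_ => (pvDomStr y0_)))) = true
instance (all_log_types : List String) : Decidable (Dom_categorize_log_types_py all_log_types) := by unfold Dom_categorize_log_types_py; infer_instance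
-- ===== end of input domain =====

-- B builds each bucket as a whole by three independent order-preserving filter passes,
-- instead of A's single pass mutating a result dict through an if/elif chain (objective: alternative).

-- ===== PORT A =====
-- the module constant LOG_TYPE_CATEGORIES
def pyLogTypeCategories : PySem.Dict String (List String) :=
  PySem.Dict.ofList
    [("Download", ["download_live", "download_live_recovery", "download_captions",
                   "download_comments", "download_posted", "download_posted_notices",
                   "channel_playlist"]),
     ("Upload", ["upload_live", "upload_posted", "upload_ia", "upload_yt",
                 "upload_rumble", "upload_bitchute", "upload_odysee", "upload_captions"]),
     ("Misc", ["core"])]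

def categorize_log_types_py (all_log_types : List String) : List (String × List String) :=
  let categorized : PySem.Dict String (List String) :=
    PySem.Dict.ofList [("Download", []), ("Upload", []), ("Misc", [])]
  let final := all_log_types.foldl (fun d log_type =>
    if (pyLogTypeCategories.getD "Download" []).contains log_type then
      d.modify "Download" [] (fun l => l ++ [log_type])
    else if (pyLogTypeCategories.getD "Upload" []).contains log_type then
      d.modify "Upload" [] (fun l => l ++ [log_type])
    else
      d.modify "Misc" [] (fun l => l ++ [log_type])) categorized
  final.items

-- ===== PORT B =====
def categorize_log_types_py_alt (all_log_types : List String) : List (String × List String) :=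
  let dl : PySem.Set String := PySem.Set.ofList (pyLogTypeCategories.getD "Download" [])
  let ul : PySem.Set String := PySem.Set.ofList (pyLogTypeCategories.getD "Upload" [])
  [("Download", all_log_types.filter (fun t => PySem.Set.contains dl t)),
   ("Upload", all_log_types.filter (fun t => PySem.Set.contains ul t)),
   ("Misc", all_log_types.filter (fun t =>
      !PySem.Set.contains dl t && !PySem.Set.contains ul t))]

-- ===== PRECONDITION & SPEC =====
def Spec_categorize_log_types_py (all_log_types : List String) (out : List (String × List String)) : Prop := out = categorize_log_types_py_alt all_log_types
instance (all_log_types : List String) (out : List (String × List String)) : Decidable (Spec_categorize_log_types_py all_log_types out) := by unfold Spec_categorize_log_types_py; infer_instance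

-- ===== CLAIM (what is proved, stated in full; the proofs are below) =====
def Claim_equal_categorize_log_types_py : Prop := ∀ (all_log_types : List String), Dom_categorize_log_types_py all_log_types → Spec_categorize_log_types_py all_log_types (categorize_log_types_py all_log_types)

-- ===== LEMMAS AND PROOFS =====

-- the Download and Upload member lists are disjoint
theorem dl_ul_disjoint (s : String) (hs : s ∈ pyLogTypeCategories.getD "Download" []) :
    s ∉ pyLogTypeCategories.getD "Upload" [] := by
  fin_cases hs <;> decide

-- A's fold over the three-key dict, with generalized accumulator values:
-- the final items are the starting values extended by the corresponding filters.
theorem fold_items (l : List String) (x y z : List String) :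
    (l.foldl (fun d log_type =>
        if (pyLogTypeCategories.getD "Download" []).contains log_type then
          d.modify "Download" [] (fun l => l ++ [log_type])
        else if (pyLogTypeCategories.getD "Upload" []).contains log_type then
          d.modify "Upload" [] (fun l => l ++ [log_type])
        else
          d.modify "Misc" [] (fun l => l ++ [log_type]))
      (PySem.Dict.mk [("Download", x), ("Upload", y), ("Misc", z)])).items =
    [("Download", x ++ l.filter (fun t => (pyLogTypeCategories.getD "Download" []).contains t)),
     ("Upload", y ++ l.filter (fun t => (pyLogTypeCategories.getD "Upload" []).contains t)),
     ("Misc", z ++ l.filter (fun t =>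
        !(pyLogTypeCategories.getD "Download" []).contains t &&
        !(pyLogTypeCategories.getD "Upload" []).contains t))] := by
  induction l generalizing x y z with
  | nil => simp
  | cons h t ih =>
    simp only [List.foldl_cons, List.filter_cons]
    by_cases hd : (pyLogTypeCategories.getD "Download" []).contains h
    · have : (PySem.Dict.mk [("Download", x), ("Upload", y), ("Misc", z)]).modify
          "Download" [] (fun l => l ++ [h]) =
          PySem.Dict.mk [("Download", x ++ [h]), ("Upload", y), ("Misc", z)] := by rfl
      rw [if_pos hd, this, ih]
      simp only [List.contains_eq_mem, decide_eq_true_eq] at hd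
      simp [hd]
      exact dl_ul_disjoint h hd
    · by_cases hu : (pyLogTypeCategories.getD "Upload" []).contains h
      · have : (PySem.Dict.mk [("Download", x), ("Upload", y), ("Misc", z)]).modify
            "Upload" [] (fun l => l ++ [h]) =
            PySem.Dict.mk [("Download", x), ("Upload", y ++ [h]), ("Misc", z)] := by rfl
        rw [if_neg hd, if_pos hu, this, ih]
        simp only [List.contains_eq_mem, decide_eq_true_eq] at hd hu
        simp [hd, hu]
      · have : (PySem.Dict.mk [("Download", x), ("Upload", y), ("Misc", z)]).modify
            "Misc" [] (fun l => l ++ [h]) =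
            PySem.Dict.mk [("Download", x), ("Upload", y), ("Misc", z ++ [h])] := by rfl
        rw [if_neg hd, if_neg hu, this, ih]
        simp only [List.contains_eq_mem, decide_eq_true_eq] at hd hu
        simp [hd, hu]

-- membership in the deduplicated set equals membership in the original list
theorem contains_ofList_dl (t : String) :
    PySem.Set.contains (PySem.Set.ofList (pyLogTypeCategories.getD "Download" [])) t =
      (pyLogTypeCategories.getD "Download" []).contains t := by
  simp [PySem.Set.contains, PySem.Set.mem_ofList]

theorem contains_ofList_ul (t : String) :
    PySem.Set.contains (PySem.Set.ofList (pyLogTypeCategories.getD "Upload" [])) t =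
      (pyLogTypeCategories.getD "Upload" []).contains t := by
  simp [PySem.Set.contains, PySem.Set.mem_ofList]

-- ===== VERDICT (by name: the statement is the Claim_ definition above) =====
theorem categorize_log_types_py_spec : Claim_equal_categorize_log_types_py := by
  intro all_log_types _
  unfold Spec_categorize_log_types_py categorize_log_types_py categorize_log_types_py_alt
  simp only [contains_ofList_dl, contains_ofList_ul]
  have hmk : PySem.Dict.ofList [("Download", ([] : List String)), ("Upload", []), ("Misc", [])] =
      PySem.Dict.mk [("Download", []), ("Upload", []), ("Misc", [])] := by decide
  rw [hmk, fold_items]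
  simp
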